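-- pv_equiv track=rewrite | github.com/seamoonpandey/Xbow | modules/context-module/reflection_analyzer.py | get_primary_context
-- ===== SOURCE A (Python) =====
-- def get_primary_context(reflections: list[dict]) -> str:
--     """return the most exploitable reflection context"""
--     if not reflections:
--         return "none"
--
--     # priority order for exploitation
--     priority = ["js_string", "js_block", "attribute", "url", "html_body", "none"]
--
--     positions = [r["position"] for r in reflections]
--     for ctx in priority:
--         if ctx in positions:
--             return ctx
--
--     return "none"
-- ===== SOURCE B (Python) =====
-- def get_primary_context(reflections: list[dict]) -> str:
--     """return the most exploitable reflection context"""
--     if not reflections: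
--         return "none"
--
--     priority = ["js_string", "js_block", "attribute", "url", "html_body", "none"]
--     rank = {ctx: i for i, ctx in enumerate(priority)}
--
--     best = None
--     for r in reflections:
--         pos = r["position"]
--         if pos in rank:
--             i = rank[pos]
--             if best is None or i < best:
--                 best = i
--     return priority[best] if best is not None else "none"
-- ===== Notes on version B (the rewrite author's own statement) =====
-- stated objective: idiomatic
-- what changed: Replaces the priority-list scan with membership tests against the positions list by a single argmin pass over the reflections using a precomputed rank table (priority string -> index), keeping the empty guard and the per-reflection r['position'] access.
import Mathlib
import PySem

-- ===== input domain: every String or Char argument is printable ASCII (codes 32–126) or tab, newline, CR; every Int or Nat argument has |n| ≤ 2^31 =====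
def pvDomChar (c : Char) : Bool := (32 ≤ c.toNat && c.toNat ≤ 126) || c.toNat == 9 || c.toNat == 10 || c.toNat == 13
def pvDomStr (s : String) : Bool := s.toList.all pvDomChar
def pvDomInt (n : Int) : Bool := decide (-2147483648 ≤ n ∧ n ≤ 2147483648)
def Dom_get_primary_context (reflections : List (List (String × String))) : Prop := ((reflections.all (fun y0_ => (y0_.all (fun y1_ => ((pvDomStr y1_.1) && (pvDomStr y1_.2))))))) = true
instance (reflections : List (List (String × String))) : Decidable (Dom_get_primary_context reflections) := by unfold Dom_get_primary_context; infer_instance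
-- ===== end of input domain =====

-- B replaces A's priority-list scan by a single argmin pass with a rank table (idiomatic; same return value).

-- r["position"]: first-match association-list lookup; Pre_ guarantees the key is present
-- (Python raises KeyError otherwise), so the getD default is unreachable on admitted inputs.
def pvPosOf (r : List (String × String)) : String := (List.lookup "position" r).getD ""

-- ===== PORT A =====
def get_primary_context (reflections : List (List (String × String))) : String :=
  if reflections = [] then "none"
  else
    let priority : List String := ["js_string", "js_block", "attribute", "url", "html_body", "none"]
    let positions : List String := reflections.map pvPosOf
    match priority.find? (fun ctx => positions.contains ctx) with
    | some ctx => ctx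
    | none => "none"

-- ===== PORT B =====
def get_primary_context_alt (reflections : List (List (String × String))) : String :=
  if reflections = [] then "none"
  else
    let priority : List String := ["js_string", "js_block", "attribute", "url", "html_body", "none"]
    -- rank lookup: PySem.List.index? priority pos plays the rank-dict role (pos in rank / rank[pos])
    let best : Option Nat := reflections.foldl
      (fun (best : Option Nat) r =>
        let pos := pvPosOf r
        match PySem.List.index? priority pos with
        | some i =>
          match best with
          | none => some i
          | some b => if i < b then some i else some b
        | none => best) none
    match best with
    | some b => priority.getD b "none"   -- priority[best]; best ≤ 5 so the default is unreachable
    | none => "none"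

-- ===== PRECONDITION & SPEC =====
-- Pre_ excludes exactly the inputs on which A raises KeyError: some reflection dict lacking the
-- "position" key (B raises the same KeyError there).
def Pre_get_primary_context (reflections : List (List (String × String))) : Prop :=
  ∀ r ∈ reflections, (List.lookup "position" r).isSome = true
instance (reflections : List (List (String × String))) : Decidable (Pre_get_primary_context reflections) := by unfold Pre_get_primary_context; infer_instance
def pvWitness_get_primary_context : (List (List (String × String))) := [[("position", "url")], [("position", "nowhere")]]

def Spec_get_primary_context (reflections : List (List (String × String))) (out : String) : Prop := out = get_primary_context_alt reflections
instance (reflections : List (List (String × String))) (out : String) : Decidable (Spec_get_primary_context reflections out) := by unfold Spec_get_primary_context; infer_instance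

-- ===== CLAIM (what is proved, stated in full; the proofs are below) =====
def Claim_equal_get_primary_context : Prop := ∀ (reflections : List (List (String × String))), Dom_get_primary_context reflections → Pre_get_primary_context reflections → Spec_get_primary_context reflections (get_primary_context reflections)

-- ===== LEMMAS AND PROOFS =====

-- option-min (none = identity), the combining operation of B's running minimum
def omin : Option Nat → Option Nat → Option Nat
  | none, y => y
  | some a, none => some a
  | some a, some b => some (min a b)

theorem omin_none_right (a : Option Nat) : omin a none = a := by cases a <;> rfl

theorem omin_assoc (a b c : Option Nat) : omin (omin a b) c = omin a (omin b c) := by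
  cases a <;> cases b <;> cases c <;> simp [omin, Nat.min_assoc]

theorem foldl_min_eq (l : List Nat) (i : Nat) :
    l.foldl min i = match l.min? with | none => i | some m => min i m := by
  induction l generalizing i with
  | nil => rfl
  | cons a l ih =>
    have h1 := ih (i := min i a)
    have h2 := ih (i := a)
    simp only [List.foldl_cons, List.min?_cons', h1, h2]
    cases l.min? <;> simp <;> omega

theorem min?_cons_omin (i : Nat) (l : List Nat) :
    (i :: l).min? = omin (some i) l.min? := by
  rw [List.min?_cons', foldl_min_eq]
  cases l.min? <;> simp [omin]

-- B's fold over reflections computes the minimum of the ranks of the positions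
theorem fold_eq_min? (priority : List String) (refl : List (List (String × String)))
    (acc : Option Nat) :
    refl.foldl
      (fun (best : Option Nat) r =>
        let pos := pvPosOf r
        match PySem.List.index? priority pos with
        | some i =>
          match best with
          | none => some i
          | some b => if i < b then some i else some b
        | none => best) acc
    = omin acc ((refl.map pvPosOf).filterMap (PySem.List.index? priority)).min? := by
  induction refl generalizing acc with
  | nil => simp [omin_none_right]
  | cons r refl ih =>
    simp only [List.foldl_cons, List.map_cons, List.filterMap_cons]
    cases h : PySem.List.index? priority (pvPosOf r) with
    | none => simpa using ih acc
    | some i =>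
      have hstep :
          (match acc with
            | none => some i
            | some b => if i < b then some i else some b) = omin acc (some i) := by
        cases acc with
        | none => rfl
        | some b => simp only [omin]; split_ifs <;> simp <;> omega
      simp only [h, hstep, ih, omin_assoc, min?_cons_omin]

-- A's priority scan equals "priority[minimum rank]" (with the shared "none" fallback)
theorem scan_eq_min (priority : List String) (ps : List String) :
    (match priority.find? (fun ctx => ps.contains ctx) with
      | some ctx => ctx
      | none => "none")
    = (match (ps.filterMap (PySem.List.index? priority)).min? with
      | some k => priority.getD k "none"
      | none => "none") := by
  induction priority with
  | nil =>
    have h : ps.filterMap (PySem.List.index? ([] : List String)) = [] := by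
      simp [PySem.List.index?_eq_idxOf?, List.filterMap_eq_nil_iff]
    simp [h]
  | cons a pr ih =>
    by_cases hmem : a ∈ ps
    · -- found immediately; rank 0 is present, so the minimum is 0
      have hfind : (a :: pr).find? (fun ctx => ps.contains ctx) = some a := by
        simp [List.find?_cons, hmem]
      have h0 : (0 : Nat) ∈ ps.filterMap (PySem.List.index? (a :: pr)) := by
        exact List.mem_filterMap.mpr ⟨a, hmem, PySem.List.index?_cons_self ..⟩
      cases hmin : (ps.filterMap (PySem.List.index? (a :: pr))).min? with
      | none => exact absurd (List.min?_eq_none_iff.mp hmin ▸ h0) (by simp)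
      | some m =>
        have hle := (List.min?_eq_some_iff.mp hmin).2 0 h0
        have : m = 0 := by omega
        subst this
        simp [List.find?_cons, hmem]
    · -- a ∉ ps: ranks on (a :: pr) are the pr-ranks shifted by one
      have hfind : (a :: pr).find? (fun ctx => ps.contains ctx)
          = pr.find? (fun ctx => ps.contains ctx) := by
        simp [List.find?_cons, hmem]
      have hshift : ps.filterMap (PySem.List.index? (a :: pr))
          = (ps.filterMap (PySem.List.index? pr)).map (· + 1) := by
        rw [List.map_filterMap]
        apply List.filterMap_congr
        intro x hx
        have hne : a ≠ x := fun h => hmem (h ▸ hx)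
        rw [PySem.List.index?_cons_of_ne]; exact hne
      have hmap : ∀ (l : List Nat), (l.map (· + 1)).min? = l.min?.map (· + 1) := by
        intro l
        induction l with
        | nil => rfl
        | cons b l ihl =>
          rw [List.map_cons, min?_cons_omin, min?_cons_omin, ihl]
          cases l.min? <;> simp [omin] <;> omega
      rw [hfind, hshift, hmap, ih]
      cases (ps.filterMap (PySem.List.index? pr)).min? <;> simp

-- ===== VERDICT (by name: the statement is the Claim_ definition above) =====
theorem get_primary_context_spec : Claim_equal_get_primary_context := by
  intro reflections _ _
  unfold Spec_get_primary_context get_primary_context get_primary_context_alt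
  by_cases h : reflections = []
  · simp [h]
  · simp only [h, if_false]
    rw [fold_eq_min?]
    exact scan_eq_min _ _
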